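-- pv_equiv track=rewrite | github.com/Ah-lib/PYTHON-PALLINDROME-PROJECT | python_pallindrome.py | nthprimepalindrome
-- ===== SOURCE A (Python) =====
-- def prime(n):
--     if n == 1:
--         return False
--     for i in range(2,n):
--         if n%i == 0:
--             return False
--     return True
--
-- def palindrome(n):
--     n = str(n)
--     if n == n[::-1]:
--         return True
--     return False
--
-- def nthprimepalindrome(n):
--     count = 0
--     i = 1
--     while count != n:
--         i += 1
--         if prime(i) and palindrome(i):
--             count += 1
--     return i
-- ===== SOURCE B (Python) =====
-- def _is_prime_palindrome(m):
--     s = str(m)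
--     if s != s[::-1]:
--         return False
--     if m < 2:
--         return False
--     d = 2
--     while d * d <= m:
--         if m % d == 0:
--             return False
--         d += 1
--     return True
--
-- def nthprimepalindrome(n):
--     remaining = n
--     m = 1
--     while remaining > 0:
--         m += 1
--         if _is_prime_palindrome(m):
--             remaining -= 1
--     return m
-- ===== Notes on version B (the rewrite author's own statement) =====
-- stated objective: faster
-- what changed: B checks the cheap palindrome test first, replaces A's full trial division up to m by trial division only up to sqrt(m), and counts down the remaining primes-palindromes instead of counting matches up.
import Mathlib
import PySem

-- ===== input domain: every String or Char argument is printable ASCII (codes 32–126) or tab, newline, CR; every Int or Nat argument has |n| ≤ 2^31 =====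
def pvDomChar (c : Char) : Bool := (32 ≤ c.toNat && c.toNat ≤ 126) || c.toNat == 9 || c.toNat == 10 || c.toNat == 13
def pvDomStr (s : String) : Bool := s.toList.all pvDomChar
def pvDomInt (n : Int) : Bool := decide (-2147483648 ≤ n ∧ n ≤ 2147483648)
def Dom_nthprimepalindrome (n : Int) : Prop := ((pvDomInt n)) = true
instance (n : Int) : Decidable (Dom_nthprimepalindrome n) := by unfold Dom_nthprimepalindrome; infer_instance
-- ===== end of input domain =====

-- B replaces A's full trial division (all i in [2, m)) by trial division only up to sqrt(m),
-- tests the cheap palindrome condition first, and counts the remaining matches down instead of up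
-- (objective: faster, asymptotically less work per candidate).
-- Both unbounded Python 'while' loops are ported with the same large fuel bound.

-- ===== PORT A =====
-- for i in range(2, n): if n % i == 0: return False
def pvPrimeLoopA (n : Int) : List Int → Bool
  | [] => true
  | i :: rest => if PySem.Int.mod n i = 0 then false else pvPrimeLoopA n rest

def pvPrimeA (n : Int) : Bool :=
  if n = 1 then false else pvPrimeLoopA n (PySem.List.pyRange 2 n 1)

-- str(n) == str(n)[::-1]  (slice? with step -1 is always some; getD is the exact value)
def pvPalA (n : Int) : Bool :=
  let s := PySem.Int.toStr n
  if s = (PySem.Str.slice? s none none (-1)).getD s then true else false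

-- the while loop of A, with fuel (the loop has no a-priori bound)
def pvLoopA (n : Int) : Nat → Int → Int → Int
  | 0, _, i => i
  | fuel+1, count, i =>
    if count = n then i
    else
      let i' := i + 1
      pvLoopA n fuel (if pvPrimeA i' && pvPalA i' then count + 1 else count) i'

def nthprimepalindrome (n : Int) : Int := pvLoopA n 5000000000 0 1

-- ===== PORT B =====
-- termination measure of B's trial-division while loop (cited by pvTrialB's decreasing_by)
theorem pvTrialMeasure {m d : Int} (h : d * d ≤ m) : (m + 1 - (d + 1)).toNat < (m + 1 - d).toNat := by
  have h0 : d ≤ d * d := by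
    by_cases h1 : 1 ≤ d
    · calc d = d * 1 := (mul_one d).symm
        _ ≤ d * d := mul_le_mul_of_nonneg_left h1 (by omega)
    · calc d ≤ 0 := by omega
        _ ≤ d * d := mul_self_nonneg d
  omega

-- while d * d <= m: if m % d == 0: return False; d += 1   (terminating: d ≤ m while d*d ≤ m)
def pvTrialB (m d : Int) : Bool :=
  if h : d * d ≤ m then
    if PySem.Int.mod m d = 0 then false else pvTrialB m (d + 1)
  else true
termination_by (m + 1 - d).toNat
decreasing_by
  exact pvTrialMeasure h

def pvIsPPB (m : Int) : Bool :=
  let s := PySem.Int.toStr m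
  if s ≠ (PySem.Str.slice? s none none (-1)).getD s then false
  else if m < 2 then false
  else pvTrialB m 2

-- the while loop of B, with fuel
def pvLoopB : Nat → Int → Int → Int
  | 0, _, m => m
  | fuel+1, remaining, m =>
    if remaining > 0 then
      let m' := m + 1
      pvLoopB fuel (if pvIsPPB m' then remaining - 1 else remaining) m'
    else m

def nthprimepalindrome_alt (n : Int) : Int := pvLoopB 5000000000 n 1

-- ===== PRECONDITION & SPEC =====
-- Pre_ excludes n < 0, on which A's while loop never terminates (count never equals n).
def Pre_nthprimepalindrome (n : Int) : Prop := 0 ≤ n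
instance (n : Int) : Decidable (Pre_nthprimepalindrome n) := by unfold Pre_nthprimepalindrome; infer_instance
def pvWitness_nthprimepalindrome : Int := 3

def Spec_nthprimepalindrome (n : Int) (out : Int) : Prop := out = nthprimepalindrome_alt n
instance (n : Int) (out : Int) : Decidable (Spec_nthprimepalindrome n out) := by unfold Spec_nthprimepalindrome; infer_instance

-- ===== CLAIM (what is proved, stated in full; the proofs are below) =====
def Claim_equal_nthprimepalindrome : Prop := ∀ (n : Int), Dom_nthprimepalindrome n → Pre_nthprimepalindrome n → Spec_nthprimepalindrome n (nthprimepalindrome n)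

-- ===== LEMMAS AND PROOFS =====

-- A's inner loop returns true iff no listed i divides n
theorem pvPrimeLoopA_eq_true (n : Int) (l : List Int) :
    pvPrimeLoopA n l = true ↔ ∀ i ∈ l, ¬ i ∣ n := by
  induction l with
  | nil => simp [pvPrimeLoopA]
  | cons i rest ih =>
    simp only [pvPrimeLoopA]
    split_ifs with h
    · simp only [false_iff]
      intro hall
      exact hall i List.mem_cons_self ((PySem.Int.mod_eq_zero_iff_dvd n i).mp h)
    · rw [ih]
      constructor
      · intro hall j hj
        rcases List.mem_cons.mp hj with rfl | hj
        · exact fun hd => h ((PySem.Int.mod_eq_zero_iff_dvd n j).mpr hd)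
        · exact hall j hj
      · intro hall j hj; exact hall j (List.mem_cons_of_mem _ hj)

theorem pvPrimeA_eq_true (m : Int) (hm : 2 ≤ m) :
    pvPrimeA m = true ↔ Nat.Prime m.toNat := by
  have hm1 : m ≠ 1 := by omega
  rw [pvPrimeA, if_neg hm1, pvPrimeLoopA_eq_true]
  have hmt : ((m.toNat : Int)) = m := Int.toNat_of_nonneg (by omega)
  rw [Nat.prime_def_lt]
  constructor
  · intro hall
    refine ⟨by omega, fun k hk hkd => ?_⟩
    by_contra hk1
    have hk0 : k ≠ 0 := by
      rintro rfl
      have := Nat.eq_zero_of_zero_dvd hkd; omega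
    have h2k : 2 ≤ k := by omega
    have : ¬ ((k : Int) ∣ m) := hall (k : Int) (by
      rw [PySem.List.mem_pyRange_one]
      constructor
      · exact_mod_cast h2k
      · rw [← hmt]; exact_mod_cast hk)
    exact this (by rw [← hmt]; exact_mod_cast hkd)
  · rintro ⟨-, hall⟩ i hi
    rw [PySem.List.mem_pyRange_one] at hi
    intro hdvd
    have hi0 : 0 ≤ i := by omega
    have hkd : i.toNat ∣ m.toNat := by
      rw [← Int.natCast_dvd_natCast, hmt, Int.toNat_of_nonneg hi0]; exact hdvd
    have := hall i.toNat (by omega) hkd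
    omega

-- B's trial loop returns true iff no e ≥ d with e*e ≤ m divides m
theorem pvTrialB_eq_true (m d : Int) (hd0 : 0 ≤ d) : pvTrialB m d = true ↔ ∀ e, d ≤ e → e * e ≤ m → ¬ e ∣ m := by
  rw [pvTrialB]
  split_ifs with h hdvd
  · simp only [false_iff]
    intro hall
    exact hall d le_rfl h ((PySem.Int.mod_eq_zero_iff_dvd m d).mp hdvd)
  · rw [pvTrialB_eq_true m (d + 1) (by omega)]
    constructor
    · intro hall e hde hem
      rcases eq_or_lt_of_le hde with heq | hlt
      · subst heq
        exact fun hd2 => hdvd ((PySem.Int.mod_eq_zero_iff_dvd m d).mpr hd2)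
      · exact hall e (by omega) hem
    · intro hall e hde hem; exact hall e (by omega) hem
  · simp only [true_iff]
    intro e hde hem hdvd2
    have hdd : d * d ≤ e * e := mul_le_mul hde hde hd0 (le_trans hd0 hde)
    exact h (by linarith)
termination_by (m + 1 - d).toNat
decreasing_by
  exact pvTrialMeasure h

theorem pvTrialB_two_eq_true (m : Int) (hm : 2 ≤ m) :
    pvTrialB m 2 = true ↔ Nat.Prime m.toNat := by
  rw [pvTrialB_eq_true m 2 (by omega)]
  have hmt : ((m.toNat : Int)) = m := Int.toNat_of_nonneg (by omega)
  rw [Nat.prime_def_le_sqrt]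
  constructor
  · intro hall
    refine ⟨by omega, fun k hk hks hkd => ?_⟩
    have hkk : (k : Int) * (k : Int) ≤ m := by
      rw [← hmt]; exact_mod_cast Nat.le_sqrt.mp hks
    exact hall (k : Int) (by exact_mod_cast hk) hkk
      (by rw [← hmt]; exact_mod_cast hkd)
  · rintro ⟨-, hall⟩ e hde hem hdvd
    have he0 : 0 ≤ e := by omega
    have hes : e.toNat ≤ Nat.sqrt m.toNat := by
      rw [Nat.le_sqrt]
      have : ((e.toNat * e.toNat : Nat) : Int) ≤ ((m.toNat : Int)) := by
        push_cast
        rw [Int.toNat_of_nonneg he0, hmt]; exact hem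
      exact_mod_cast this
    refine hall e.toNat (by omega) hes ?_
    rw [← Int.natCast_dvd_natCast, hmt, Int.toNat_of_nonneg he0]; exact hdvd

-- the per-candidate tests of A and B agree for every candidate m ≥ 2
theorem tests_eq (m : Int) (hm : 2 ≤ m) :
    (pvPrimeA m && pvPalA m) = pvIsPPB m := by
  rw [pvIsPPB, pvPalA]
  set s := PySem.Int.toStr m with hs
  by_cases hp : s = (PySem.Str.slice? s none none (-1)).getD s
  · rw [if_pos hp, if_neg (by simpa using hp), if_neg (by omega), Bool.and_true]
    by_cases hA : pvPrimeA m = true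
    · rw [hA, Eq.symm ((pvTrialB_two_eq_true m hm).mpr ((pvPrimeA_eq_true m hm).mp hA))]
    · rw [Bool.not_eq_true] at hA
      rw [hA]
      have : ¬ pvTrialB m 2 = true := fun h =>
        (Bool.not_eq_true _).mpr hA ((pvPrimeA_eq_true m hm).mpr ((pvTrialB_two_eq_true m hm).mp h))
      simp [Bool.not_eq_true] at this
      rw [this]
  · rw [if_neg hp, if_pos (by simpa using hp), Bool.and_false]

-- the two while loops run in lockstep
theorem loops_eq : ∀ (fuel : Nat) (n count i : Int), 0 ≤ count → count ≤ n → 1 ≤ i →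
    pvLoopA n fuel count i = pvLoopB fuel (n - count) i := by
  intro fuel
  induction fuel with
  | zero => intro n count i _ _ _; rfl
  | succ f ih =>
    intro n count i hc0 hcn hi
    by_cases hstop : count = n
    · rw [pvLoopA, if_pos hstop, pvLoopB, if_neg (by omega)]
    · rw [pvLoopA, if_neg hstop, pvLoopB, if_pos (by omega)]
      have ht := tests_eq (i + 1) (by omega)
      show pvLoopA n f (if (pvPrimeA (i + 1) && pvPalA (i + 1)) = true then count + 1 else count) (i + 1)
          = pvLoopB f (if pvIsPPB (i + 1) = true then n - count - 1 else n - count) (i + 1)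
      rw [ht]
      by_cases hpp : pvIsPPB (i + 1) = true
      · rw [hpp, if_pos rfl, if_pos rfl, ih n (count + 1) (i + 1) (by omega) (by omega) (by omega)]
        ring_nf
      · rw [Bool.not_eq_true] at hpp
        rw [hpp]
        simp only [Bool.false_eq_true, if_false]
        exact ih n count (i + 1) hc0 hcn (by omega)

-- ===== VERDICT (by name: the statement is the Claim_ definition above) =====
theorem nthprimepalindrome_spec : Claim_equal_nthprimepalindrome := by
  intro n _ hpre
  unfold Spec_nthprimepalindrome nthprimepalindrome nthprimepalindrome_alt
  rw [loops_eq 5000000000 n 0 1 le_rfl hpre le_rfl, sub_zero]
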